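-- pv_equiv track=rewrite | github.com/henryhallam/orbit-tricks | tle_util.py | _linesum
-- ===== SOURCE A (Python) =====
-- def _linesum(tle_line):
--     n = 0
--     for d in tle_line:
--         if d.isdigit():
--             n = n + int(d)
--         elif d == '-':
--             n = n + 1
--     return str(n % 10)
-- ===== SOURCE B (Python) =====
-- def _linesum(tle_line):
--     counts = {}
--     for ch in tle_line:
--         counts[ch] = counts.get(ch, 0) + 1
--     total = counts.get('-', 0)
--     for value, ch in enumerate('0123456789'):
--         total += value * counts.get(ch, 0)
--     return str(total % 10)
-- ===== Notes on version B (the rewrite author's own statement) =====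
-- stated objective: alternative
-- what changed: B builds a character-frequency table in one pass and then sums value*count over the fixed digit alphabet (plus the '-' tally), instead of A's per-character branch-and-accumulate loop.
import Mathlib
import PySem

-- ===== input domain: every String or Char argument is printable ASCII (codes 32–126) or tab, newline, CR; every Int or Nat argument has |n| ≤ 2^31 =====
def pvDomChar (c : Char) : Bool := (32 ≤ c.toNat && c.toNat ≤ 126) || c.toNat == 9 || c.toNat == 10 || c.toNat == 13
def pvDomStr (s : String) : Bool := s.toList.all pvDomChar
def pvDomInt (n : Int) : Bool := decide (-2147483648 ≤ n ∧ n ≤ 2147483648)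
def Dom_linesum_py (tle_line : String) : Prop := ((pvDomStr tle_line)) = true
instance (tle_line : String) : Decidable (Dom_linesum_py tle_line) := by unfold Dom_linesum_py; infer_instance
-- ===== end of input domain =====

-- B computes the same checksum from a frequency table of the characters
-- (one counting pass, then a sum over the fixed digit alphabet); objective: alternative decomposition.

-- ===== PORT A =====
def linesum_py (tle_line : String) : String :=
  let n : Int := tle_line.toList.foldl
    (fun n d =>
      if PySem.Chars.isdigit d then n + (PySem.Int.ofChars? [d]).getD 0
      else if d == '-' then n + 1
      else n) 0
  PySem.Int.toStr (PySem.Int.mod n 10)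

-- ===== PORT B =====
def linesum_py_alt (tle_line : String) : String :=
  let counts : PySem.Dict Char Int := tle_line.toList.foldl
    (fun d ch => d.insert ch (d.getD ch 0 + 1)) PySem.Dict.empty
  let total : Int := (PySem.List.enumerate "0123456789".toList).foldl
    (fun t p => t + (p.1 : Int) * counts.getD p.2 0) (counts.getD '-' 0)
  PySem.Int.toStr (PySem.Int.mod total 10)

-- ===== PRECONDITION & SPEC =====
def Spec_linesum_py (tle_line : String) (out : String) : Prop := out = linesum_py_alt tle_line
instance (tle_line : String) (out : String) : Decidable (Spec_linesum_py tle_line out) := by unfold Spec_linesum_py; infer_instance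

-- ===== CLAIM (what is proved, stated in full; the proofs are below) =====
def Claim_equal_linesum_py : Prop := ∀ (tle_line : String), Dom_linesum_py tle_line → Spec_linesum_py tle_line (linesum_py tle_line)

-- ===== LEMMAS AND PROOFS =====

/-- per-character contribution of A's loop body -/
def pvG (d : Char) : Int :=
  if PySem.Chars.isdigit d then (PySem.Int.ofChars? [d]).getD 0
  else if d == '-' then 1 else 0

/-- per-character contribution as B sees it, via the fixed alphabet -/
def pvH (c : Char) : Int :=
  (if c == '-' then 1 else 0) +
  ((if c == '1' then 1 else 0) + 2 * (if c == '2' then 1 else 0) + 3 * (if c == '3' then 1 else 0)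
   + 4 * (if c == '4' then 1 else 0) + 5 * (if c == '5' then 1 else 0) + 6 * (if c == '6' then 1 else 0)
   + 7 * (if c == '7' then 1 else 0) + 8 * (if c == '8' then 1 else 0) + 9 * (if c == '9' then 1 else 0))

/-- B's total as a function of the list's counts -/
def pvS (l : List Char) : Int :=
  (l.count '-' : Int) + ((l.count '1' : Int) + 2 * (l.count '2' : Int) + 3 * (l.count '3' : Int)
   + 4 * (l.count '4' : Int) + 5 * (l.count '5' : Int) + 6 * (l.count '6' : Int)
   + 7 * (l.count '7' : Int) + 8 * (l.count '8' : Int) + 9 * (l.count '9' : Int))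

set_option maxHeartbeats 4000000 in
set_option maxRecDepth 4096 in
theorem pvG_eq_pvH_small : ∀ n : Fin 127, pvDomChar (Char.ofNat n.val) = true →
    pvG (Char.ofNat n.val) = pvH (Char.ofNat n.val) := by decide

theorem pvG_eq_pvH (c : Char) (h : pvDomChar c = true) : pvG c = pvH c := by
  have hlt : c.toNat < 127 := by
    simp only [pvDomChar, Bool.or_eq_true, Bool.and_eq_true, beq_iff_eq,
      decide_eq_true_eq] at h
    omega
  have hc : Char.ofNat c.toNat = c := Char.ofNat_toNat c
  have := pvG_eq_pvH_small ⟨c.toNat, hlt⟩ (by rw [hc]; exact h)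
  rwa [hc] at this

theorem pvS_cons (c : Char) (l : List Char) (h : pvDomChar c = true) :
    pvS (c :: l) = pvG c + pvS l := by
  rw [pvG_eq_pvH c h]
  simp only [pvS, pvH, List.count_cons]
  push_cast
  ring

theorem pvFoldA (l : List Char) (h : l.all pvDomChar = true) (n : Int) :
    l.foldl (fun n d =>
      if PySem.Chars.isdigit d then n + (PySem.Int.ofChars? [d]).getD 0
      else if d == '-' then n + 1
      else n) n = n + pvS l := by
  induction l generalizing n with
  | nil => simp [pvS]
  | cons c l ih =>
    simp only [List.all_cons, Bool.and_eq_true] at h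
    have hbody : (if PySem.Chars.isdigit c then n + (PySem.Int.ofChars? [c]).getD 0
        else if c == '-' then n + 1 else n) = n + pvG c := by
      simp only [pvG]; split_ifs <;> simp
    simp only [List.foldl_cons, hbody, ih h.2, pvS_cons c l h.1]
    ring

theorem linesum_py_spec : Claim_equal_linesum_py := by
  intro s hdom
  unfold Spec_linesum_py linesum_py linesum_py_alt
  simp only []
  rw [pvFoldA s.toList hdom 0]
  have hcnt : ∀ v : Char,
      (s.toList.foldl (fun d ch => d.insert ch (d.getD ch 0 + 1)) PySem.Dict.empty).getD v 0
        = (s.toList.count v : Int) := by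
    intro v
    rw [PySem.Dict.getD_foldl_insert_add_one]
    simp [PySem.Dict.getD_empty]
  simp only [hcnt]
  congr 1
  simp [pvS, PySem.List.enumerate]
  ring_nf
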